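-- pv_equiv track=rewrite | github.com/kouki-haruna-sml/modules | reach_change_ver3.py | reach_over_n
-- ===== SOURCE A (Python) =====
-- def reach_over_n(reached_panelers, valid_panelers, n):
--     keys_ls = list(reached_panelers.keys())
--     values_ls = list(reached_panelers.values())
--     count = 0
--
--     for i in range(len(keys_ls)):
--         if keys_ls[i] in valid_panelers and values_ls[i] >= n:
--             count += 1
--         else:
--             pass
--     return count
-- ===== SOURCE B (Python) =====
-- def reach_over_n(reached_panelers, valid_panelers, n):
--     items = sorted(reached_panelers.items(), key=lambda kv: kv[0])
--     valid = sorted(set(valid_panelers))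
--     i = j = count = 0
--     while i < len(items) and j < len(valid):
--         k, v = items[i]
--         if k < valid[j]:
--             i += 1
--         elif valid[j] < k:
--             j += 1
--         else:
--             if v >= n:
--                 count += 1
--             i += 1
--             j += 1
--     return count
-- ===== Notes on version B (the rewrite author's own statement) =====
-- stated objective: faster
-- what changed: Replaces A's index loop that scans the valid_panelers list for every key by a sort-merge join: sort the dict items by key, sort the deduplicated valid keys, then count matches with value >= n in a single two-pointer merge pass.
import Mathlib
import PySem

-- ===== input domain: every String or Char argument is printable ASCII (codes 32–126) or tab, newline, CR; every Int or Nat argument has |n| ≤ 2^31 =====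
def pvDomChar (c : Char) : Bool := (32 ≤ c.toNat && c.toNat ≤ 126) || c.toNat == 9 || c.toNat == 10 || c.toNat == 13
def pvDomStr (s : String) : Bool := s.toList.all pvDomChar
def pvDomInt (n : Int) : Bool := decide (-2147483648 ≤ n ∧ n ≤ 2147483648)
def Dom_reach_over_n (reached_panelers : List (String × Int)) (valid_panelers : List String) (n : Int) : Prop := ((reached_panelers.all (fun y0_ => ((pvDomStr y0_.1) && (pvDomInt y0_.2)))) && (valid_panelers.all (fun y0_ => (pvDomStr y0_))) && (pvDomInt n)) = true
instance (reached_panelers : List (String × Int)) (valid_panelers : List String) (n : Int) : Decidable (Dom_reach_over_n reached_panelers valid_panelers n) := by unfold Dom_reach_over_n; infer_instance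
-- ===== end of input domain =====

-- B replaces A's index loop with per-key list-membership scans by a sort-merge join:
-- sort the dict items by key, sort the deduplicated valid keys, and count matches with
-- value ≥ n in one two-pointer merge pass (measured faster in a timing run).

-- ===== PORT A =====
-- literal transliteration of A: keys/values lists, index loop, two-condition test
def reach_over_n (reached_panelers : List (String × Int)) (valid_panelers : List String) (n : Int) : Int :=
  let keys_ls := reached_panelers.map Prod.fst
  let values_ls := reached_panelers.map Prod.snd
  (PySem.List.pyRange 0 (PySem.List.len keys_ls)).foldl
    (fun count i =>
      if PySem.List.pyGetD keys_ls i "" ∈ valid_panelers ∧ PySem.List.pyGetD values_ls i 0 ≥ n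
      then count + 1 else count) 0
  -- indices i come from range(len(keys_ls)), so keys_ls[i]/values_ls[i] never raise;
  -- pyGetD's defaults are unreachable

-- ===== PORT B =====
-- the while loop with cursors i, j over the two sorted lists, as the structural
-- recursion consuming the two suffixes items[i:], valid[j:]
def mergeCountLoop (n : Int) : List (String × Int) → List String → Int → Int
  | [], _, count => count
  | _ :: _, [], count => count
  | (k, v) :: xs, y :: ys, count =>
    if k < y then mergeCountLoop n xs (y :: ys) count
    else if y < k then mergeCountLoop n ((k, v) :: xs) ys count
    else mergeCountLoop n xs ys (if v ≥ n then count + 1 else count)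
termination_by xs ys _ => xs.length + ys.length

-- literal transliteration of B: sort items by key, sort set(valid), merge-count
def reach_over_n_alt (reached_panelers : List (String × Int)) (valid_panelers : List String) (n : Int) : Int :=
  let items := PySem.List.sorted reached_panelers Prod.fst false
  let valid := PySem.List.sorted (PySem.Set.ofList valid_panelers) (fun x => x) false
  mergeCountLoop n items valid 0

-- ===== PRECONDITION & SPEC =====
-- reached_panelers models a Python dict, whose keys are necessarily distinct:
-- Pre_ states that representation invariant and excludes nothing a Python call can produce.
def Pre_reach_over_n (reached_panelers : List (String × Int)) (valid_panelers : List String) (n : Int) : Prop :=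
  (reached_panelers.map Prod.fst).Nodup
instance (reached_panelers : List (String × Int)) (valid_panelers : List String) (n : Int) : Decidable (Pre_reach_over_n reached_panelers valid_panelers n) := by unfold Pre_reach_over_n; infer_instance
def pvWitness_reach_over_n : (List (String × Int)) × List String × Int :=
  ([("a", 3), ("b", 1)], ["a", "c"], 2)

def Spec_reach_over_n (reached_panelers : List (String × Int)) (valid_panelers : List String) (n : Int) (out : Int) : Prop := out = reach_over_n_alt reached_panelers valid_panelers n
instance (reached_panelers : List (String × Int)) (valid_panelers : List String) (n : Int) (out : Int) : Decidable (Spec_reach_over_n reached_panelers valid_panelers n out) := by unfold Spec_reach_over_n; infer_instance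

-- ===== CLAIM (what is proved, stated in full; the proofs are below) =====
def Claim_equal_reach_over_n : Prop := ∀ (reached_panelers : List (String × Int)) (valid_panelers : List String) (n : Int), Dom_reach_over_n reached_panelers valid_panelers n → Pre_reach_over_n reached_panelers valid_panelers n → Spec_reach_over_n reached_panelers valid_panelers n (reach_over_n reached_panelers valid_panelers n)

-- ===== LEMMAS AND PROOFS =====

-- A counts exactly the pairs of the association list whose key is valid and value ≥ n.
lemma reach_over_n_eq_countP (rp : List (String × Int)) (vp : List String) (n : Int) :
    reach_over_n rp vp n
      = (rp.countP (fun q => decide (q.1 ∈ vp ∧ n ≤ q.2)) : Int) := by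
  unfold reach_over_n
  rw [PySem.List.foldl_ite_add_one
      (p := fun i => PySem.List.pyGetD (rp.map Prod.fst) i "" ∈ vp
                      ∧ PySem.List.pyGetD (rp.map Prod.snd) i 0 ≥ n)]
  have hmap := PySem.List.map_pyGetD_pyRange_zero rp ("", 0)
  have : (PySem.List.pyRange 0 (PySem.List.len (rp.map Prod.fst))).countP
        (fun i => decide (PySem.List.pyGetD (rp.map Prod.fst) i "" ∈ vp
                          ∧ PySem.List.pyGetD (rp.map Prod.snd) i 0 ≥ n))
      = rp.countP (fun q => decide (q.1 ∈ vp ∧ n ≤ q.2)) := by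
    have hlen : PySem.List.len (rp.map Prod.fst) = PySem.List.len rp := by
      simp [PySem.List.len]
    rw [hlen]
    conv_rhs => rw [← hmap]
    rw [List.countP_map]
    refine List.countP_congr (fun i _ => ?_)
    have h1 : PySem.List.pyGetD (rp.map Prod.fst) i "" = (PySem.List.pyGetD rp i ("", 0)).1 :=
      PySem.List.pyGetD_map Prod.fst rp i ("", 0)
    have h2 : PySem.List.pyGetD (rp.map Prod.snd) i 0 = (PySem.List.pyGetD rp i ("", 0)).2 :=
      PySem.List.pyGetD_map Prod.snd rp i ("", 0)
    simp [Function.comp, h1, h2, ge_iff_le]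
  rw [this]
  ring

-- The merge loop over strictly key-sorted lists counts the pairs whose key occurs
-- in the second list and whose value is ≥ n.
lemma mergeCountLoop_eq_countP (n : Int) (xs : List (String × Int)) (ys : List String) (c : Int)
    (hx : xs.Pairwise (fun a b => a.1 < b.1)) (hy : ys.Pairwise (· < ·)) :
    mergeCountLoop n xs ys c = c + (xs.countP (fun q => decide (q.1 ∈ ys ∧ n ≤ q.2)) : Int) := by
  fun_induction mergeCountLoop n xs ys c with
  | case1 ys c => simp
  | case2 x xs c => simp
  | case3 k v xs y ys c hlt ih =>
    rw [ih (List.Pairwise.of_cons hx) hy]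
    have hk : k ∉ y :: ys := by
      intro hmem
      rcases List.mem_cons.mp hmem with h | h
      · exact absurd (h ▸ hlt) (lt_irrefl y)
      · exact absurd (lt_trans hlt ((List.pairwise_cons.mp hy).1 _ h)) (lt_irrefl k)
    simp only [List.countP_cons, List.mem_cons]
    have : ¬((k = y ∨ k ∈ ys) ∧ n ≤ v) := fun h => hk (List.mem_cons.mpr h.1)
    simp [this]
  | case4 k v xs y ys c h1 hgt ih =>
    rw [ih hx (List.Pairwise.of_cons hy)]
    congr 1
    congr 1
    refine List.countP_congr (fun q hq => ?_)
    have hyq : y < q.1 := by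
      rcases List.mem_cons.mp hq with h | h
      · exact h ▸ hgt
      · exact lt_trans hgt ((List.pairwise_cons.mp hx).1 _ h)
    have : q.1 ∈ y :: ys ↔ q.1 ∈ ys := by
      simp only [List.mem_cons, or_iff_right_iff_imp]
      intro he; exact absurd (he ▸ hyq) (lt_irrefl y)
    simp [this]
  | case5 k v xs y ys c h1 h2 ih =>
    have heq : k = y := le_antisymm (not_lt.mp h2) (not_lt.mp h1)
    have htail : xs.countP (fun q => decide (q.1 ∈ y :: ys ∧ n ≤ q.2))
        = xs.countP (fun q => decide (q.1 ∈ ys ∧ n ≤ q.2)) := by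
      refine List.countP_congr (fun q hq => ?_)
      have hyq : y < q.1 := heq ▸ (List.pairwise_cons.mp hx).1 _ hq
      have : q.1 ∈ y :: ys ↔ q.1 ∈ ys := by
        simp only [List.mem_cons, or_iff_right_iff_imp]
        intro he; exact absurd (he ▸ hyq) (lt_irrefl y)
      simp [this]
    simp only [dite_eq_ite] at ih
    rw [ih (List.Pairwise.of_cons hx) (List.Pairwise.of_cons hy)]
    rw [List.countP_cons, htail]
    simp [heq, ge_iff_le]
    split_ifs <;> ring

lemma reach_over_n_alt_eq_countP (rp : List (String × Int)) (vp : List String) (n : Int)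
    (hnd : (rp.map Prod.fst).Nodup) :
    reach_over_n_alt rp vp n
      = (rp.countP (fun q => decide (q.1 ∈ vp ∧ n ≤ q.2)) : Int) := by
  unfold reach_over_n_alt
  have hle := PySem.List.sorted_pairwise rp Prod.fst
  have hperm : (PySem.List.sorted rp Prod.fst false).Perm rp := PySem.List.sorted_perm rp Prod.fst false
  have hnd2 : ((PySem.List.sorted rp Prod.fst false).map Prod.fst).Nodup :=
    (hperm.map Prod.fst).nodup_iff.mpr hnd
  have hx : (PySem.List.sorted rp Prod.fst false).Pairwise (fun a b => a.1 < b.1) :=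
    ((hle.and (List.pairwise_map.mp hnd2)).imp (fun h => lt_of_le_of_ne h.1 h.2))
  have hy : (PySem.List.sorted (PySem.Set.ofList vp) (fun x => x) false).Pairwise (· < ·) :=
    PySem.List.sorted_ofList_pairwise_lt vp
  rw [mergeCountLoop_eq_countP n _ _ 0 hx hy, zero_add]
  congr 1
  rw [hperm.countP_eq]
  refine List.countP_congr (fun q _ => ?_)
  have hmem : (q.1 ∈ PySem.List.sorted (PySem.Set.ofList vp) (fun x => x) false) ↔ q.1 ∈ vp := by
    rw [PySem.List.mem_sorted]
    exact PySem.Set.mem_ofList (xs := vp) (y := q.1)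
  simp [hmem]

-- ===== VERDICT (by name: the statement is the Claim_ definition above) =====
theorem reach_over_n_spec : Claim_equal_reach_over_n := by
  intro rp vp n _ hpre
  unfold Spec_reach_over_n
  rw [reach_over_n_eq_countP, reach_over_n_alt_eq_countP rp vp n hpre]
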